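-- pv_equiv track=rewrite | github.com/dlylinyao/CollectiveVsIndividualAITextDetect | featuriz.py | stack_dict
-- ===== SOURCE A (Python) =====
-- def stack_dict(ds: list):
--     """Suppose ds are already flattened."""
--     keys = list(ds[0].keys())
--     assert all(keys == list(_.keys()) for _ in ds[1:])
--     d2 = {k: [] for k in keys}
--     for d in ds:
--         for k, v in d.items():
--             d2[k].append(v)
--     return d2
-- ===== SOURCE B (Python) =====
-- def stack_dict(ds: list):
--     """Suppose ds are already flattened."""
--     keys = list(ds[0].keys())
--     assert all(keys == list(_.keys()) for _ in ds[1:])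
--     rows = [list(d.values()) for d in ds]
--     return {k: [row[i] for row in rows] for i, k in enumerate(keys)}
-- ===== Notes on version B (the rewrite author's own statement) =====
-- stated objective: alternative
-- what changed: B builds a value matrix once and gathers each key's column by index, instead of pre-initialising a dict of empty lists and appending value-by-value row after row.
import Mathlib
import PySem

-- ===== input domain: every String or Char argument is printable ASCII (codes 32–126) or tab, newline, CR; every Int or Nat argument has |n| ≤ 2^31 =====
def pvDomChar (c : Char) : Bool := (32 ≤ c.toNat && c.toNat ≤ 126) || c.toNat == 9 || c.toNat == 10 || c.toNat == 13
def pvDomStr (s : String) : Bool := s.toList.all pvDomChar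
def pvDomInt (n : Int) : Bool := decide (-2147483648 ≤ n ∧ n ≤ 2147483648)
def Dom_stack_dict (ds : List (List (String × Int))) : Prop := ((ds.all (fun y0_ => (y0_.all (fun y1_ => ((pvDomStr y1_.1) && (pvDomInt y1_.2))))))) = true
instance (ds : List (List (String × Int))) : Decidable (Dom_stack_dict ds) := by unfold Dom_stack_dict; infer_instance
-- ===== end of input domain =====

-- B gathers each key's column from a value matrix by index instead of appending value-by-value row after row (alternative decomposition, same cost).

-- ===== PORT A =====
-- d2[k].append(v): rebuild the association list, appending v to the entry whose key is k
def pvAppend (acc : List (String × List Int)) (k : String) (v : Int) : List (String × List Int) :=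
  acc.map (fun p => if p.1 == k then (p.1, p.2 ++ [v]) else p)

def stack_dict (ds : List (List (String × Int))) : List (String × List Int) :=
  match PySem.List.pyGet? ds 0 with
  | none => []   -- IndexError on ds[0]; excluded by Pre_
  | some d0 =>
    let keys := d0.map Prod.fst
    if (ds.drop 1).all (fun d => d.map Prod.fst == keys) then
      ds.foldl (fun acc d => d.foldl (fun acc kv => pvAppend acc kv.1 kv.2) acc)
        (keys.map (fun k => (k, ([] : List Int))))
    else []      -- AssertionError; excluded by Pre_

-- ===== PORT B =====
def stack_dict_alt (ds : List (List (String × Int))) : List (String × List Int) :=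
  match PySem.List.pyGet? ds 0 with
  | none => []   -- IndexError on ds[0]; excluded by Pre_
  | some d0 =>
    let keys := d0.map Prod.fst
    if (ds.drop 1).all (fun d => d.map Prod.fst == keys) then
      let rows := ds.map (fun d => d.map Prod.snd)
      -- {k: [row[i] for row in rows] for i, k in enumerate(keys)}; under Pre_ every row has length keys.length, so row[i] never raises
      keys.zipIdx.map (fun ki =>
        (ki.1, rows.map (fun r => (PySem.List.pyGet? r (Int.ofNat ki.2)).getD 0)))
    else []      -- AssertionError; excluded by Pre_

-- ===== PRECONDITION & SPEC =====
-- Pre_ excludes the empty list (A raises IndexError on ds[0]) and mismatched key sequences (A's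
-- assert raises AssertionError); the Nodup conjunct only states well-formedness of the dict
-- representation — a Python dict cannot hold duplicate keys, so it excludes no real input.
def Pre_stack_dict (ds : List (List (String × Int))) : Prop :=
  ds ≠ [] ∧ (∀ d ∈ ds, d.map Prod.fst = (ds.headI).map Prod.fst) ∧ ((ds.headI).map Prod.fst).Nodup

instance (ds : List (List (String × Int))) : Decidable (Pre_stack_dict ds) := by
  unfold Pre_stack_dict; infer_instance

def pvWitness_stack_dict : (List (List (String × Int))) :=
  [[("a", 1), ("b", 2)], [("a", 3), ("b", 4)]]

def Spec_stack_dict (ds : List (List (String × Int))) (out : List (String × List Int)) : Prop := out = stack_dict_alt ds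
instance (ds : List (List (String × Int))) (out : List (String × List Int)) : Decidable (Spec_stack_dict ds out) := by unfold Spec_stack_dict; infer_instance

-- ===== CLAIM (what is proved, stated in full; the proofs are below) =====
def Claim_equal_stack_dict : Prop := ∀ (ds : List (List (String × Int))), Dom_stack_dict ds → Pre_stack_dict ds → Spec_stack_dict ds (stack_dict ds)

-- ===== LEMMAS AND PROOFS =====

-- the inner loop's step function
def pvStep (acc : List (String × List Int)) (kv : String × Int) : List (String × List Int) :=
  pvAppend acc kv.1 kv.2

theorem pvAppend_cons_ne {k0 : String} {vs : List Int} {acc : List (String × List Int)}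
    {k : String} {v : Int} (h : k ≠ k0) :
    pvAppend ((k0, vs) :: acc) k v = (k0, vs) :: pvAppend acc k v := by
  simp [pvAppend]
  exact Ne.symm h

theorem pvAppend_not_mem {acc : List (String × List Int)} {k : String} {v : Int}
    (h : k ∉ acc.map Prod.fst) : pvAppend acc k v = acc := by
  induction acc with
  | nil => rfl
  | cons p rest ih =>
    simp only [List.map_cons, List.mem_cons, not_or] at h
    have hrest := ih h.2
    calc pvAppend (p :: rest) k v = p :: pvAppend rest k v := by
          simp [pvAppend]
          exact fun e => absurd e.symm h.1
      _ = p :: rest := by rw [hrest]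

theorem pvFold_cons (d : List (String × Int)) (p : String × List Int)
    (acc : List (String × List Int)) (h : ∀ kv ∈ d, kv.1 ≠ p.1) :
    d.foldl pvStep (p :: acc) = p :: d.foldl pvStep acc := by
  induction d generalizing acc with
  | nil => rfl
  | cons kv d' ih =>
    have hkv : kv.1 ≠ p.1 := h kv (by simp)
    have hstep : pvStep (p :: acc) kv = p :: pvStep acc kv := by
      obtain ⟨k0, vs⟩ := p
      exact pvAppend_cons_ne hkv
    rw [List.foldl_cons, hstep, List.foldl_cons,
        ih _ (fun kv' hkv' => h kv' (by simp [hkv']))]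

-- one inner loop: folding one dict d over an aligned accumulator appends each value positionally
theorem pvInner (d : List (String × Int)) (acc : List (String × List Int))
    (hk : d.map Prod.fst = acc.map Prod.fst) (hnd : (d.map Prod.fst).Nodup) :
    d.foldl pvStep acc
      = List.zipWith (fun (p : String × List Int) (kv : String × Int) => (p.1, p.2 ++ [kv.2])) acc d := by
  induction d generalizing acc with
  | nil =>
    have hlen := congrArg List.length hk
    simp only [List.map_nil, List.length_nil, List.length_map] at hlen
    have : acc = [] := List.eq_nil_of_length_eq_zero hlen.symm
    simp [this]
  | cons kv d' ih =>
    cases acc with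
    | nil => simp at hk
    | cons p acc' =>
      obtain ⟨k0, vs⟩ := p
      obtain ⟨k, v⟩ := kv
      simp only [List.map_cons, List.cons.injEq] at hk
      obtain ⟨hk0, hk'⟩ := hk
      subst hk0
      simp only [List.map_cons, List.nodup_cons] at hnd
      obtain ⟨hkn, hnd'⟩ := hnd
      have h1 : pvStep ((k, vs) :: acc') (k, v) = (k, vs ++ [v]) :: acc' := by
        have h2 : pvAppend acc' k v = acc' := pvAppend_not_mem (by rw [← hk']; exact hkn)
        simp [pvStep, pvAppend] at h2 ⊢
        exact h2
      have hne : ∀ kv' ∈ d', kv'.1 ≠ k := by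
        intro kv' hkv' he
        exact hkn (List.mem_map.mpr ⟨kv', hkv', he⟩)
      rw [List.foldl_cons, h1, pvFold_cons d' (k, vs ++ [v]) acc' hne, ih acc' hk' hnd']
      rfl

theorem pvMapFstZipWith : ∀ (acc : List (String × List Int)) (d : List (String × Int)),
    acc.length = d.length →
    (List.zipWith (fun (p : String × List Int) (kv : String × Int) => (p.1, p.2 ++ [kv.2])) acc d).map Prod.fst
      = acc.map Prod.fst := by
  intro acc
  induction acc with
  | nil => intro d _; simp
  | cons p acc' ih =>
    intro d hlen
    cases d with
    | nil => simp at hlen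
    | cons kv d' =>
      simp only [List.length_cons, Nat.add_right_cancel_iff] at hlen
      simp [ih d' hlen]

-- the outer loop: folding every dict appends, at each position, that dict's value at that position
theorem pvOuter (keys : List String) :
    ∀ (dss : List (List (String × Int))) (acc : List (String × List Int)),
    keys.Nodup → acc.map Prod.fst = keys → (∀ d ∈ dss, d.map Prod.fst = keys) →
    dss.foldl (fun a d => d.foldl pvStep a) acc
      = acc.zipIdx.map (fun pi =>
          (pi.1.1, pi.1.2 ++ dss.map (fun d => ((PySem.List.pyGet? (d.map Prod.snd) (Int.ofNat pi.2)).getD 0)))) := by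
  intro dss
  induction dss with
  | nil =>
    intro acc _ _ _
    simp
  | cons d rest ih =>
    intro acc hnd hacc hall
    have hd : d.map Prod.fst = keys := hall d (by simp)
    have hlen : acc.length = d.length := by
      have h1 := congrArg List.length hacc
      have h2 := congrArg List.length hd
      simp only [List.length_map] at h1 h2
      omega
    have hinner := pvInner d acc (by rw [hd, hacc]) (by rw [hd]; exact hnd)
    set acc2 := List.zipWith (fun (p : String × List Int) (kv : String × Int) => (p.1, p.2 ++ [kv.2])) acc d with hacc2
    have hacc2fst : acc2.map Prod.fst = keys := by
      rw [hacc2, pvMapFstZipWith acc d hlen, hacc]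
    have hrest := ih acc2 hnd hacc2fst (fun d' hd' => hall d' (by simp [hd']))
    rw [List.foldl_cons, hinner, hrest]
    apply List.ext_getElem
    · simp [hacc2]; omega
    · intro i hi1 hi2
      have hiacc : i < acc.length := by simp [hacc2] at hi1; omega
      have hid : i < d.length := by omega
      simp only [List.getElem_map, List.getElem_zipIdx, hacc2, List.getElem_zipWith,
        List.map_cons, PySem.List.pyGet?_natCast, Int.ofNat_eq_natCast,
        List.getElem?_map]
      simp [List.getElem?_eq_getElem hid, List.append_assoc]

-- ===== VERDICT (by name: the statement is the Claim_ definition above) =====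
theorem stack_dict_spec : Claim_equal_stack_dict := by
  intro ds _ hPre
  obtain ⟨hne, hkeys, hnd⟩ := hPre
  cases ds with
  | nil => exact absurd rfl hne
  | cons d0 rest =>
    have hhead : (d0 :: rest).headI = d0 := rfl
    rw [hhead] at hkeys hnd
    unfold Spec_stack_dict stack_dict stack_dict_alt
    have hget : PySem.List.pyGet? (d0 :: rest) 0 = some d0 := PySem.List.pyGet?_zero_cons d0 rest
    rw [hget]
    have hcond : (((d0 :: rest).drop 1).all (fun d => d.map Prod.fst == d0.map Prod.fst)) = true := by
      simp only [List.drop_one, List.tail_cons, List.all_eq_true, beq_iff_eq]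
      exact fun d hd => hkeys d (by simp [hd])
    simp only [hcond, if_true]
    have hinit : (List.map (fun k => (k, ([] : List Int))) (d0.map Prod.fst)).map Prod.fst
        = d0.map Prod.fst := by
      simp [List.map_map, Function.comp]
    rw [show (fun (acc : List (String × List Int)) (kv : String × Int) => pvAppend acc kv.1 kv.2) = pvStep from rfl]
    rw [pvOuter (d0.map Prod.fst) (d0 :: rest)
      (List.map (fun k => (k, ([] : List Int))) (d0.map Prod.fst)) hnd hinit hkeys]
    apply List.ext_getElem
    · simp
    · intro i hi1 hi2
      simp [List.getElem_map, List.getElem_zipIdx, List.map_map, Function.comp]
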